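-- pv_equiv track=rewrite | github.com/Zoruyo/Vasarely | vasarely.py | permutTab
-- ===== SOURCE A (Python) =====
-- def permutTab(tab_proj_col, W):
--     tab_proj_col2 = []
--     while len(tab_proj_col) > 1 and str(tab_proj_col[0]) != str(W):
--         #Tableau [<__main__.Point3d object at 0x0000015144574880>]
--         #Point   ['<__main__.Point3d object at 0x0000015144516D30>']
--         for X in tab_proj_col:
--             if X != W:
--                 tab_proj_col2.append(X)
--                 tab_proj_col.remove(X)
--                 break
--     return(tab_proj_col2)
-- ===== SOURCE B (Python) =====
-- def permutTab(tab_proj_col, W):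
--     # Single linear pass: A repeatedly moves the front element (always the first
--     # non-W one) out, stopping at a W front or when one element is left.
--     # Like A, this removes the returned prefix from the caller's list in place.
--     out = []
--     n = len(tab_proj_col)
--     for i, x in enumerate(tab_proj_col):
--         if x == W or i == n - 1:
--             break
--         out.append(x)
--     del tab_proj_col[:len(out)]
--     return out
-- ===== Notes on version B (the rewrite author's own statement) =====
-- stated objective: faster
-- what changed: Replaced the quadratic while-loop (which rescans the list, removes from the front and re-checks the head each round) by one linear pass that takes the prefix of non-W elements while keeping at least one element, then deletes that prefix in place once.
import Mathlib
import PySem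

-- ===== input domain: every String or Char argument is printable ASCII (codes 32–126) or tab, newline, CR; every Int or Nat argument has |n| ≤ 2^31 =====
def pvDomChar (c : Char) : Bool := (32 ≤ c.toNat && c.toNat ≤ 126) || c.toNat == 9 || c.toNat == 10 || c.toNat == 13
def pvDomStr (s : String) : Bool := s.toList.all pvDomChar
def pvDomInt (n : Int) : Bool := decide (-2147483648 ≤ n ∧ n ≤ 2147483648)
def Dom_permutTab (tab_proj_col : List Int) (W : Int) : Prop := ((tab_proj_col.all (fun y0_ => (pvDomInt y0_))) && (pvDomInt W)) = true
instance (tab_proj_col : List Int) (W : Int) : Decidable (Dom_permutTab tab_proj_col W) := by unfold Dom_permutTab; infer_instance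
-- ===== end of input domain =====

-- B does one linear pass instead of A's quadratic remove-from-front loop; return values
-- agree everywhere (both Pythons also strip the returned prefix from the caller's list).

-- ===== PORT A =====
-- while len(tab) > 1 and str(tab[0]) != str(W): find first X != W, append it, remove it.
-- Fuel = initial length: each executed iteration removes one element, so it never runs out;
-- the 'none' fallbacks are unreachable under the loop condition (head exists and head != W).
def permutTab_loop (W : Int) : Nat → List Int → List Int → List Int
  | 0, _, out => out
  | f + 1, tab, out =>
    if tab.length > 1 ∧ (PySem.List.pyGet? tab 0).map PySem.Int.toStr ≠ some (PySem.Int.toStr W) then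
      match tab.find? (fun X => X != W) with
      | some X =>
        match PySem.List.remove? tab X with
        | some tab' => permutTab_loop W f tab' (out ++ [X])
        | none => out
      | none => out
    else out

def permutTab (tab_proj_col : List Int) (W : Int) : List Int :=
  permutTab_loop W tab_proj_col.length tab_proj_col []

-- ===== PORT B =====
-- for i, x in enumerate(tab): if x == W or i == n-1: break; out.append(x)
def permutTab_altGo (W : Int) : List Int → List Int
  | [] => []
  | x :: rest => if x = W ∨ rest.isEmpty then [] else x :: permutTab_altGo W rest

def permutTab_alt (tab_proj_col : List Int) (W : Int) : List Int :=
  permutTab_altGo W tab_proj_col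

-- ===== PRECONDITION & SPEC =====
def Spec_permutTab (tab_proj_col : List Int) (W : Int) (out : List Int) : Prop := out = permutTab_alt tab_proj_col W
instance (tab_proj_col : List Int) (W : Int) (out : List Int) : Decidable (Spec_permutTab tab_proj_col W out) := by unfold Spec_permutTab; infer_instance

-- ===== CLAIM (what is proved, stated in full; the proofs are below) =====
def Claim_equal_permutTab : Prop := ∀ (tab_proj_col : List Int) (W : Int), Dom_permutTab tab_proj_col W → Spec_permutTab tab_proj_col W (permutTab tab_proj_col W)

-- ===== LEMMAS AND PROOFS =====

-- str(n) is injective on Int: first, Nat.toDigits 10 is injective, via a decode round trip.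

-- canonical fuel-free digits of n in base 10
def pvDigits (n : Nat) : List Char :=
  if _h : n < 10 then [Nat.digitChar n]
  else pvDigits (n / 10) ++ [Nat.digitChar (n % 10)]
decreasing_by exact Nat.div_lt_self (by omega) (by omega)

def pvDec (l : List Char) : Nat := l.foldl (fun a c => 10 * a + (c.toNat - 48)) 0

theorem pvDigitChar_toNat {k : Nat} (h : k < 10) : (Nat.digitChar k).toNat - 48 = k := by
  interval_cases k <;> decide

theorem pvDec_pvDigits (n : Nat) : pvDec (pvDigits n) = n := by
  induction n using Nat.strong_induction_on with
  | _ n ih =>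
    rw [pvDigits]
    by_cases h : n < 10
    · simp [h, pvDec, pvDigitChar_toNat h]
    · simp only [h, dite_false, pvDec, List.foldl_append, List.foldl]
      have hd : pvDec (pvDigits (n / 10)) = n / 10 :=
        ih _ (Nat.div_lt_self (by omega) (by omega))
      show 10 * ((pvDigits (n / 10)).foldl _ 0) + ((n % 10).digitChar.toNat - 48) = n
      rw [show ((pvDigits (n / 10)).foldl (fun a c => 10 * a + (c.toNat - 48)) 0) = n / 10 from hd,
        pvDigitChar_toNat (Nat.mod_lt _ (by omega))]
      omega

theorem pvToDigitsCore_append (f n : Nat) (ds : List Char) :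
    Nat.toDigitsCore 10 f n ds = Nat.toDigitsCore 10 f n [] ++ ds := by
  induction f generalizing n ds with
  | zero => simp [Nat.toDigitsCore]
  | succ f ih =>
    simp only [Nat.toDigitsCore]
    by_cases h : n / 10 = 0
    · simp [h]
    · simp only [h, if_false]
      rw [ih (n / 10) [(n % 10).digitChar], ih (n / 10) ((n % 10).digitChar :: ds)]
      simp

theorem pvToDigitsCore_eq_pvDigits (f n : Nat) (h : n < f) :
    Nat.toDigitsCore 10 f n [] = pvDigits n := by
  induction f generalizing n with
  | zero => omega
  | succ f ih =>
    simp only [Nat.toDigitsCore]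
    rw [pvDigits]
    by_cases hn : n < 10
    · have : n / 10 = 0 := Nat.div_eq_of_lt hn
      simp only [this, if_true, hn, dite_true]
      rw [Nat.mod_eq_of_lt hn]
    · have h10 : ¬ n / 10 = 0 := by omega
      simp only [h10, if_false, hn, dite_false]
      rw [pvToDigitsCore_append, ih (n / 10) (by omega)]

theorem pvToDigits_eq (n : Nat) : Nat.toDigits 10 n = pvDigits n :=
  pvToDigitsCore_eq_pvDigits (n + 1) n (Nat.lt_succ_self n)

theorem pvDigits_inj {a b : Nat} (h : pvDigits a = pvDigits b) : a = b := by
  have := congrArg pvDec h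
  rwa [pvDec_pvDigits, pvDec_pvDigits] at this

theorem pvDigitChar_ne_dash {k : Nat} (h : k < 10) : Nat.digitChar k ≠ '-' := by
  interval_cases k <;> decide

theorem pvNoDash (n : Nat) : '-' ∉ pvDigits n := by
  induction n using Nat.strong_induction_on with
  | _ n ih =>
    rw [pvDigits]
    by_cases h : n < 10
    · simp only [h, dite_true, List.mem_singleton]
      intro hc
      exact pvDigitChar_ne_dash h hc.symm
    · simp only [h, dite_false, List.mem_append, List.mem_singleton]
      rintro (hc | hc)
      · exact ih _ (Nat.div_lt_self (by omega) (by omega)) hc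
      · exact pvDigitChar_ne_dash (Nat.mod_lt n (by omega)) hc.symm

theorem pvToChars_inj {a b : Int} (h : PySem.Int.toChars a = PySem.Int.toChars b) : a = b := by
  unfold PySem.Int.toChars at h
  rw [pvToDigits_eq, pvToDigits_eq, pvToDigits_eq, pvToDigits_eq] at h
  by_cases ha : a < 0 <;> by_cases hb : b < 0 <;> simp only [ha, hb, if_true, if_false] at h
  · injection h with _ h2
    have := pvDigits_inj h2
    omega
  · exact absurd (h ▸ List.mem_cons_self) (pvNoDash b.toNat)
  · exact absurd (h.symm ▸ List.mem_cons_self) (pvNoDash a.toNat)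
  · have := pvDigits_inj h
    omega

theorem pvToStr_inj {a b : Int} (h : PySem.Int.toStr a = PySem.Int.toStr b) : a = b := by
  apply pvToChars_inj
  have := congrArg String.toList h
  rwa [PySem.Int.toList_toStr, PySem.Int.toList_toStr] at this

theorem permutTab_loop_eq (W : Int) :
    ∀ (f : Nat) (tab out : List Int), tab.length ≤ f →
      permutTab_loop W f tab out = out ++ permutTab_altGo W tab := by
  intro f
  induction f with
  | zero =>
    intro tab out h
    have : tab = [] := List.eq_nil_of_length_eq_zero (by omega)
    subst this
    simp [permutTab_loop, permutTab_altGo]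
  | succ f ih =>
    intro tab out h
    match tab with
    | [] => simp [permutTab_loop, permutTab_altGo]
    | [x] =>
      rw [permutTab_loop, permutTab_altGo]
      rw [if_neg (by simp), if_pos (by simp)]
      simp
    | x :: y :: rest =>
      rw [permutTab_loop]
      by_cases hxW : x = W
      · subst hxW
        rw [if_neg (by simp [PySem.List.pyGet?_zero_cons])]
        rw [permutTab_altGo, if_pos (Or.inl rfl)]
        simp
      · have hcond : ((x :: y :: rest).length > 1 ∧
            (PySem.List.pyGet? (x :: y :: rest) 0).map PySem.Int.toStr ≠ some (PySem.Int.toStr W)) := by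
          refine ⟨by simp, ?_⟩
          simp only [PySem.List.pyGet?_zero_cons, Option.map_some]
          intro hc
          exact hxW (pvToStr_inj (Option.some.inj hc))
        rw [if_pos hcond]
        have hfind : (x :: y :: rest).find? (fun X => X != W) = some x :=
          List.find?_cons_of_pos (by simp [hxW])
        simp only [hfind, PySem.List.remove?_cons_self]
        rw [ih (y :: rest) (out ++ [x]) (by simp at h ⊢; omega)]
        conv_rhs => rw [permutTab_altGo]
        rw [if_neg (by simp [hxW])]
        simp

-- ===== VERDICT (by name: the statement is the Claim_ definition above) =====
theorem permutTab_spec : Claim_equal_permutTab := by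
  intro tab W _
  unfold Spec_permutTab permutTab permutTab_alt
  exact permutTab_loop_eq W tab.length tab [] (le_refl _)
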